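-- pv_equiv track=rewrite | github.com/rathodsa/data_science | my_scripts/map_function.py | counting_valkeys
-- ===== SOURCE A (Python) =====
-- def counting_valkeys(steps, path):
--     current_level = 0
--     count = 0
--     for i in range(steps):
--         if path[i] == 'U':
--             current_level += 1
--         elif path[i] == 'D':
--             current_level -= 1
--             if current_level == -1:
--                 count += 1
--     return count
-- ===== SOURCE B (Python) =====
-- def counting_valkeys(steps, path):
--     # Build-a-table-then-filter: first the per-step deltas and the running
--     # prefix-sum levels, then count the 'D' steps whose level hits -1.
--     deltas = [1 if path[i] == 'U' else (-1 if path[i] == 'D' else 0)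
--               for i in range(steps)]
--     levels = []
--     level = 0
--     for d in deltas:
--         level += d
--         levels.append(level)
--     total = 0
--     for i in range(len(deltas)):
--         if path[i] == 'D' and levels[i] == -1:
--             total += 1
--     return total
-- ===== Notes on version B (the rewrite author's own statement) =====
-- stated objective: alternative
-- what changed: Replaced the single stateful scan (running level + count updated inside the 'D' branch) by a build-then-filter decomposition: a delta table, a prefix-sum level table, and a final filtering count over indices.
import Mathlib
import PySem

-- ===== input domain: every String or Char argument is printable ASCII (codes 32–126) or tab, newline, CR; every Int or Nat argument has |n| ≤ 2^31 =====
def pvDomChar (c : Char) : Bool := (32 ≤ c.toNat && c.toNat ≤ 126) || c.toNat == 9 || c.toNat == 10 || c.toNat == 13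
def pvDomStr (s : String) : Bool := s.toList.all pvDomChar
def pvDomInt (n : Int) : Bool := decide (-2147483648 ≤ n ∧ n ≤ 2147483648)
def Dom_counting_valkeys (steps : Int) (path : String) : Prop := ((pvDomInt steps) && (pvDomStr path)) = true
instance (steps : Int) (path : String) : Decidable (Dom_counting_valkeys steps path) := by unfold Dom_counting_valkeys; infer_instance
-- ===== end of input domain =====

-- B replaces A's single stateful scan by a build-then-filter decomposition (delta table,
-- prefix-sum level table, then a counting pass); same O(n) cost, alternative structure.

-- ===== PORT A =====
-- single pass: running level and count, count bumped inside the 'D' branch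
def counting_valkeys (steps : Int) (path : String) : Int :=
  ((PySem.List.pyRange 0 steps 1).foldl
    (fun (st : Int × Int) i =>
      if PySem.List.pyGetD path.toList i ' ' = 'U' then (st.1 + 1, st.2)      -- path[i]; in range under Pre_
      else if PySem.List.pyGetD path.toList i ' ' = 'D' then
        (st.1 - 1, if st.1 - 1 = -1 then st.2 + 1 else st.2)
      else st)
    (0, 0)).2

-- ===== PORT B =====
-- build-then-filter: delta table, prefix-sum level table, then a counting pass
def counting_valkeys_alt (steps : Int) (path : String) : Int :=
  let deltas : List Int :=
    (PySem.List.pyRange 0 steps 1).map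
      (fun i =>
        if PySem.List.pyGetD path.toList i ' ' = 'U' then 1                  -- path[i]; in range under Pre_
        else if PySem.List.pyGetD path.toList i ' ' = 'D' then -1 else 0)
  let levels : List Int :=
    (deltas.foldl (fun (st : Int × List Int) d => (st.1 + d, st.2 ++ [st.1 + d])) (0, [])).2
  (PySem.List.pyRange 0 (PySem.List.len deltas) 1).foldl
    (fun acc i =>
      if PySem.List.pyGetD path.toList i ' ' = 'D' ∧ PySem.List.pyGetD levels i 0 = -1
      then acc + 1 else acc)
    0

-- ===== PRECONDITION & SPEC =====
-- Pre_ excludes exactly the inputs where A raises IndexError: steps larger than len(path).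
def Pre_counting_valkeys (steps : Int) (path : String) : Prop :=
  steps ≤ (path.toList.length : Int)
instance (steps : Int) (path : String) : Decidable (Pre_counting_valkeys steps path) := by
  unfold Pre_counting_valkeys; infer_instance

def pvWitness_counting_valkeys : Int × String := (5, "UDDUD")

def Spec_counting_valkeys (steps : Int) (path : String) (out : Int) : Prop := out = counting_valkeys_alt steps path
instance (steps : Int) (path : String) (out : Int) : Decidable (Spec_counting_valkeys steps path out) := by unfold Spec_counting_valkeys; infer_instance

-- ===== CLAIM (what is proved, stated in full; the proofs are below) =====
def Claim_equal_counting_valkeys : Prop := ∀ (steps : Int) (path : String), Dom_counting_valkeys steps path → Pre_counting_valkeys steps path → Spec_counting_valkeys steps path (counting_valkeys steps path)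

-- ===== LEMMAS AND PROOFS =====

def cvDelta (c : Char) : Int := if c = 'U' then 1 else if c = 'D' then -1 else 0

def cvPref (l : Int) : List Int → List Int
  | [] => []
  | d :: ds => (l + d) :: cvPref (l + d) ds

def cvCnt : List Char → Int → Int
  | [], _ => 0
  | c :: cs, l =>
      (if c = 'D' ∧ l + cvDelta c = -1 then 1 else 0) + cvCnt cs (l + cvDelta c)

theorem cv_foldlA (t : List Char) (l n : Int) :
    t.foldl (fun (st : Int × Int) c =>
        if c = 'U' then (st.1 + 1, st.2)
        else if c = 'D' then (st.1 - 1, if st.1 - 1 = -1 then st.2 + 1 else st.2)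
        else st) (l, n)
      = (l + (t.map cvDelta).sum, n + cvCnt t l) := by
  induction t generalizing l n with
  | nil => simp [cvCnt]
  | cons c cs ih =>
      simp only [List.foldl_cons]
      by_cases hU : c = 'U'
      · subst hU
        rw [if_pos rfl, ih]
        refine Prod.ext ?_ ?_ <;> simp [cvCnt, cvDelta] <;> ring
      · by_cases hD : c = 'D'
        · subst hD
          rw [if_neg hU, if_pos rfl, ih]
          refine Prod.ext ?_ ?_ <;> simp [cvCnt, cvDelta]
          · ring
          · have h2 : l + -1 = l - 1 := by ring
            rw [h2]
            split_ifs with h <;> ring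
        · rw [if_neg hU, if_neg hD, ih]
          refine Prod.ext ?_ ?_ <;> simp [cvCnt, cvDelta, hU, hD]

theorem cv_foldl_levels (ds : List Int) (l : Int) (acc : List Int) :
    ds.foldl (fun (st : Int × List Int) d => (st.1 + d, st.2 ++ [st.1 + d])) (l, acc)
      = (l + ds.sum, acc ++ cvPref l ds) := by
  induction ds generalizing l acc with
  | nil => simp [cvPref]
  | cons d ds ih => simp [List.foldl_cons, ih, cvPref]; ring

theorem cv_length_pref (l : Int) (ds : List Int) : (cvPref l ds).length = ds.length := by
  induction ds generalizing l with
  | nil => simp [cvPref]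
  | cons d ds ih => simp [cvPref, ih]

theorem cv_foldl_count (t : List Char) (l n : Int) :
    (t.zip (cvPref l (t.map cvDelta))).foldl
        (fun acc p => if p.1 = 'D' ∧ p.2 = -1 then acc + 1 else acc) n
      = n + cvCnt t l := by
  induction t generalizing l n with
  | nil => simp [cvCnt]
  | cons c cs ih =>
      simp only [List.map_cons, cvPref, List.zip_cons_cons, List.foldl_cons, ih, cvCnt]
      split_ifs with h <;> ring

theorem cv_pyGetD_take {α : Type} (xs : List α) (k : Nat) (i : Int) (d : α)
    (h0 : 0 ≤ i) (hi : i < (k : Int)) (hk : k ≤ xs.length) :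
    PySem.List.pyGetD xs i d = PySem.List.pyGetD (xs.take k) i d := by
  rw [PySem.List.pyGetD_eq_getElem xs d h0 (by omega),
      PySem.List.pyGetD_eq_getElem (xs.take k) d h0 (by simp [List.length_take]; omega)]
  simp [List.getElem_take]

theorem cv_pyGetD_zip {α β : Type} (xs : List α) (ys : List β) (i : Int) (dx : α) (dy : β)
    (hlen : ys.length = xs.length) (h0 : 0 ≤ i) (hi : i < (xs.length : Int)) :
    PySem.List.pyGetD (xs.zip ys) i (dx, dy)
      = (PySem.List.pyGetD xs i dx, PySem.List.pyGetD ys i dy) := by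
  rw [PySem.List.pyGetD_eq_getElem (xs.zip ys) (dx, dy) h0 (by simp [List.length_zip]; omega),
      PySem.List.pyGetD_eq_getElem xs dx h0 hi,
      PySem.List.pyGetD_eq_getElem ys dy h0 (by rw [hlen]; exact hi)]
  simp


theorem cv_main (steps : Int) (path : String) (hpre : steps ≤ (path.toList.length : Int)) :
    counting_valkeys steps path = counting_valkeys_alt steps path := by
  simp only [counting_valkeys, counting_valkeys_alt]
  by_cases hs : steps ≤ 0
  · simp [PySem.List.pyRange_one_eq_nil hs, PySem.List.len,
      PySem.List.pyRange_one_eq_nil (le_refl (0 : Int))]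
  · rw [not_le] at hs
    set cs := path.toList with hcs
    set t := cs.take steps.toNat with ht
    have htlen : (t.length : Int) = steps := by
      simp [ht, List.length_take]; omega
    have hget : ∀ i : Int, 0 ≤ i → i < steps →
        PySem.List.pyGetD cs i ' ' = PySem.List.pyGetD t i ' ' := by
      intro i h0 hi
      exact cv_pyGetD_take cs steps.toNat i ' ' h0 (by omega) (by omega)
    have hA : ∀ (acc : Int × Int), ∀ i ∈ PySem.List.pyRange 0 steps 1,
        (fun (st : Int × Int) i =>
          if PySem.List.pyGetD cs i ' ' = 'U' then (st.1 + 1, st.2)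
          else if PySem.List.pyGetD cs i ' ' = 'D' then
            (st.1 - 1, if st.1 - 1 = -1 then st.2 + 1 else st.2)
          else st) acc i
        = (fun (st : Int × Int) i =>
            (fun (st : Int × Int) c =>
              if c = 'U' then (st.1 + 1, st.2)
              else if c = 'D' then (st.1 - 1, if st.1 - 1 = -1 then st.2 + 1 else st.2)
              else st) st (PySem.List.pyGetD t i ' ')) acc i := by
      intro acc i hi
      rw [PySem.List.mem_pyRange_one] at hi
      simp only [hget i hi.1 hi.2]
    rw [PySem.List.foldl_congr_mem _ _ _ _ hA]
    have hB : ∀ i ∈ PySem.List.pyRange 0 steps 1,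
        (fun i =>
          if PySem.List.pyGetD cs i ' ' = 'U' then (1 : Int)
          else if PySem.List.pyGetD cs i ' ' = 'D' then -1 else 0) i
        = (fun i => cvDelta (PySem.List.pyGetD t i ' ')) i := by
      intro i hi
      rw [PySem.List.mem_pyRange_one] at hi
      simp only [hget i hi.1 hi.2, cvDelta]
    rw [List.map_congr_left hB]
    rw [← htlen, show ((t.length : Int)) = PySem.List.len t from (PySem.List.len_eq t).symm]
    rw [PySem.List.foldl_pyRange_zero_pyGetD t ' '
      (fun (st : Int × Int) c =>
        if c = 'U' then (st.1 + 1, st.2)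
        else if c = 'D' then (st.1 - 1, if st.1 - 1 = -1 then st.2 + 1 else st.2)
        else st) (0, 0)]
    rw [show (fun i => cvDelta (PySem.List.pyGetD t i ' '))
          = cvDelta ∘ (fun i => PySem.List.pyGetD t i ' ') from rfl,
        ← List.map_map, PySem.List.map_pyGetD_pyRange_zero]
    rw [cv_foldlA, cv_foldl_levels]
    simp only [List.nil_append]
    set lvls := cvPref 0 (t.map cvDelta) with hlvls
    have hlen1 : lvls.length = t.length := by
      rw [hlvls, cv_length_pref, List.length_map]
    have hC : ∀ (acc : Int), ∀ i ∈ PySem.List.pyRange 0 (PySem.List.len (t.map cvDelta)) 1,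
        (fun (acc : Int) i =>
          if PySem.List.pyGetD cs i ' ' = 'D' ∧ PySem.List.pyGetD lvls i 0 = -1
          then acc + 1 else acc) acc i
        = (fun (acc : Int) i =>
            (fun (acc : Int) (p : Char × Int) =>
              if p.1 = 'D' ∧ p.2 = -1 then acc + 1 else acc) acc
              (PySem.List.pyGetD (t.zip lvls) i (' ', 0))) acc i := by
      intro acc i hi
      rw [PySem.List.mem_pyRange_one] at hi
      have hi2 : i < (t.length : Int) := by
        have := hi.2
        simpa [PySem.List.len_eq] using this
      simp only [cv_pyGetD_zip t lvls i ' ' 0 hlen1 hi.1 hi2,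
        hget i hi.1 (by omega)]
    show (0 : Int) + cvCnt t 0 = List.foldl
        (fun (acc : Int) (i : Int) =>
          if PySem.List.pyGetD cs i ' ' = 'D' ∧ PySem.List.pyGetD lvls i 0 = -1
          then acc + 1 else acc) 0
        (PySem.List.pyRange 0 (PySem.List.len (List.map cvDelta t)) 1)
    rw [PySem.List.foldl_congr_mem (PySem.List.pyRange 0 (PySem.List.len (List.map cvDelta t)) 1) _ _ 0 hC]
    have hzlen : PySem.List.len (t.map cvDelta) = PySem.List.len (t.zip lvls) := by
      simp [PySem.List.len_eq, List.length_zip, hlen1]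
    rw [hzlen, PySem.List.foldl_pyRange_zero_pyGetD (t.zip lvls) (' ', 0)
      (fun (acc : Int) (p : Char × Int) => if p.1 = 'D' ∧ p.2 = -1 then acc + 1 else acc) 0,
      cv_foldl_count]

-- ===== VERDICT (by name: the statement is the Claim_ definition above) =====
theorem counting_valkeys_spec : Claim_equal_counting_valkeys := by
  intro steps path _ hpre
  exact cv_main steps path hpre
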